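-- pv_equiv track=rewrite | github.com/tunatuna123/baekjoon | Python/1308.py | after_1000_years
-- ===== SOURCE A (Python) =====
-- def after_1000_years(a):
--     ans = 0
--     for i in range(a,a+1000):
--         if i % 400 == 0:
--             ans += 366
--         elif i%100 == 0:
--             ans += 365
--         elif i % 4 == 0:
--             ans += 366
--         else:
--             ans += 365
--     return ans
-- ===== SOURCE B (Python) =====
-- def after_1000_years(a):
--     # closed form: 365000 + leap days, counting multiples of k in [a, a+1000)
--     def count(k):
--         return (a + 999) // k - (a - 1) // k
--     return 365000 + count(4) - count(100) + count(400)
-- ===== Notes on version B (the rewrite author's own statement) =====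
-- stated objective: faster
-- what changed: Replaced the year-by-year loop with a closed form: a constant base of days plus the window's leap-year count, computed as floor-division differences over the window endpoints for the divisors four, one hundred and four hundred; no loop at all.
import Mathlib
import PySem

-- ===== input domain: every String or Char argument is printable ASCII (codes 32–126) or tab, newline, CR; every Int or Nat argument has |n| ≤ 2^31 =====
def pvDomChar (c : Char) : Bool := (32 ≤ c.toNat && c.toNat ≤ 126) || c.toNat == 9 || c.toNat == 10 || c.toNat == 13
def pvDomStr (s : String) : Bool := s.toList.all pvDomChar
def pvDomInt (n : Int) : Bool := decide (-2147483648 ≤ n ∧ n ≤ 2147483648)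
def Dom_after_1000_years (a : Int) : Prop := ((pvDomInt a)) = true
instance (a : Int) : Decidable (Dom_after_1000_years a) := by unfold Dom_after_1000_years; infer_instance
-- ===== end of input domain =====

-- B replaces A's per-year loop with a closed-form leap-year count via floor-division differences (constant-time, no loop).

-- ===== PORT A =====
def after_1000_years (a : Int) : Int :=
  (PySem.List.pyRange a (a + 1000) 1).foldl
    (fun ans i =>
      if PySem.Int.mod i 400 = 0 then ans + 366
      else if PySem.Int.mod i 100 = 0 then ans + 365
      else if PySem.Int.mod i 4 = 0 then ans + 366
      else ans + 365)
    0

-- ===== PORT B =====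
def pvCount (a k : Int) : Int :=
  PySem.Int.floordiv (a + 999) k - PySem.Int.floordiv (a - 1) k

def after_1000_years_alt (a : Int) : Int :=
  365000 + pvCount a 4 - pvCount a 100 + pvCount a 400

-- ===== PRECONDITION & SPEC =====
def Spec_after_1000_years (a : Int) (out : Int) : Prop := out = after_1000_years_alt a
instance (a : Int) (out : Int) : Decidable (Spec_after_1000_years a out) := by unfold Spec_after_1000_years; infer_instance

-- ===== CLAIM (what is proved, stated in full; the proofs are below) =====
def Claim_equal_after_1000_years : Prop := ∀ (a : Int), Dom_after_1000_years a → Spec_after_1000_years a (after_1000_years a)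

-- ===== LEMMAS AND PROOFS =====

-- the loop invariant: the partial sum over range(a, a+n) is 365*n plus the three
-- multiples-counts expressed as floor-division differences (ediv = floordiv, divisor > 0)
theorem pvLoop_closed (a : Int) (n : Nat) :
    (PySem.List.pyRange a (a + n) 1).foldl
      (fun ans i =>
        if PySem.Int.mod i 400 = 0 then ans + 366
        else if PySem.Int.mod i 100 = 0 then ans + 365
        else if PySem.Int.mod i 4 = 0 then ans + 366
        else ans + 365)
      0
    = 365 * n + ((a + n - 1) / 4 - (a - 1) / 4)
        - ((a + n - 1) / 100 - (a - 1) / 100)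
        + ((a + n - 1) / 400 - (a - 1) / 400) := by
  induction n with
  | zero =>
      rw [show a + (0 : Nat) = a by push_cast; ring, PySem.List.pyRange_one_eq_nil (le_refl a)]
      simp
  | succ m ih =>
      rw [show a + ((m + 1 : Nat) : Int) = (a + m) + 1 by push_cast; ring,
        PySem.List.pyRange_one_succ_right (by omega : a ≤ a + m),
        List.foldl_append, ih]
      simp only [List.foldl]
      rw [PySem.Int.mod_eq_emod_of_pos (by norm_num : (0:Int) < 400),
        PySem.Int.mod_eq_emod_of_pos (by norm_num : (0:Int) < 100),
        PySem.Int.mod_eq_emod_of_pos (by norm_num : (0:Int) < 4)]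
      split_ifs <;> push_cast <;> omega

theorem after_1000_years_eq (a : Int) : after_1000_years a = after_1000_years_alt a := by
  unfold after_1000_years after_1000_years_alt pvCount
  rw [show a + (1000 : Int) = a + ((1000 : Nat) : Int) by norm_num, pvLoop_closed a 1000]
  rw [PySem.Int.floordiv_eq_ediv_of_pos (by norm_num : (0:Int) < 4),
    PySem.Int.floordiv_eq_ediv_of_pos (by norm_num : (0:Int) < 100),
    PySem.Int.floordiv_eq_ediv_of_pos (by norm_num : (0:Int) < 400),
    PySem.Int.floordiv_eq_ediv_of_pos (by norm_num : (0:Int) < 4),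
    PySem.Int.floordiv_eq_ediv_of_pos (by norm_num : (0:Int) < 100),
    PySem.Int.floordiv_eq_ediv_of_pos (by norm_num : (0:Int) < 400)]
  push_cast
  omega

-- ===== VERDICT (by name: the statement is the Claim_ definition above) =====
theorem after_1000_years_spec : Claim_equal_after_1000_years := by
  intro a _
  unfold Spec_after_1000_years
  exact after_1000_years_eq a
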